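-- pv_equiv track=rewrite | github.com/Mangul-Lab-USC/benchmarking_error_correction | scripts/evaluation/data_metrics.py | dataset
-- ===== SOURCE A (Python) =====
-- def dataset(list):
--     dataset_list = []
--     for item in list:
--         if "TRA" in item:
--             dataset_list.append("TRA")
--         elif "IGH" in item:
--             dataset_list.append("IGH")
--         elif "t1" in item:
--             dataset_list.append("T1")
--         elif "t3" in item:
--             dataset_list.append("T3")
--         elif "SRR" in item:
--             dataset_list.append("RSR")
--         else:
--             dataset_list.append("IGH")
--
--     return dataset_list
-- ===== SOURCE B (Python) =====
-- # B: staged overwrite passes — start all items at the default label, then sweep the whole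
-- # list once per pattern in REVERSE priority order, overwriting matches; the last overwrite
-- # (highest priority) wins, so this equals A's first-match if/elif chain.
-- def dataset(list):
--     labels = ["IGH"] * len(list)
--     for pat, lab in [("SRR", "RSR"), ("t3", "T3"), ("t1", "T1"), ("IGH", "IGH"), ("TRA", "TRA")]:
--         for i, item in enumerate(list):
--             if pat in item:
--                 labels[i] = lab
--     return labels
-- ===== Notes on version B (the rewrite author's own statement) =====
-- stated objective: alternative
-- what changed: Replaced the per-item if/elif chain with staged overwrite passes: all labels start at the default, then one full sweep per pattern in reverse priority order overwrites matching positions, so the last overwrite equals A's first match.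
import Mathlib
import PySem

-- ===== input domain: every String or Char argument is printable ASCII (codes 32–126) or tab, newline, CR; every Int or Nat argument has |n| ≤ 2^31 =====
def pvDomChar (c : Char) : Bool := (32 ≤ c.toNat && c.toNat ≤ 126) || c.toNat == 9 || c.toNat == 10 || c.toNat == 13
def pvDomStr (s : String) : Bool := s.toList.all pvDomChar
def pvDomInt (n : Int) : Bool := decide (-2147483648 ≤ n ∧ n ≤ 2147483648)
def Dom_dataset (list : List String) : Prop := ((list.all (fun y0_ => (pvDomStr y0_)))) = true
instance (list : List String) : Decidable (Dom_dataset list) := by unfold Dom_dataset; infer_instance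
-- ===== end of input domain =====

-- B replaces A's per-item if/elif chain by staged overwrite passes (one sweep per pattern,
-- reverse priority, last overwrite wins); same cost, different traversal order.


-- ===== PORT A =====
def dataset (list : List String) : List String :=
  list.foldl (fun dataset_list item =>
    dataset_list ++
      [if PySem.Str.isIn "TRA" item then "TRA"
       else if PySem.Str.isIn "IGH" item then "IGH"
       else if PySem.Str.isIn "t1" item then "T1"
       else if PySem.Str.isIn "t3" item then "T3"
       else if PySem.Str.isIn "SRR" item then "RSR"
       else "IGH"]) []

-- ===== PORT B =====
-- one sweep of the list per (pattern, label) pair: overwrite labels[i] where the pattern occurs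
def dsSweep (p : String × String) (labels : List String) (list : List String) : List String :=
  List.zipWith (fun l item => if PySem.Str.isIn p.1 item then p.2 else l) labels list

def dataset_alt (list : List String) : List String :=
  [("SRR", "RSR"), ("t3", "T3"), ("t1", "T1"), ("IGH", "IGH"), ("TRA", "TRA")].foldl
    (fun labels p => dsSweep p labels list)
    (list.map (fun _ => "IGH"))

-- ===== PRECONDITION & SPEC =====
def Spec_dataset (list : List String) (out : List String) : Prop := out = dataset_alt list
instance (list : List String) (out : List String) : Decidable (Spec_dataset list out) := by unfold Spec_dataset; infer_instance

-- ===== CLAIM (what is proved, stated in full; the proofs are below) =====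
def Claim_equal_dataset : Prop := ∀ (list : List String), Dom_dataset list → Spec_dataset list (dataset list)

-- ===== LEMMAS AND PROOFS =====
-- a sweep over labels that are already a pointwise function of the list is again such a map
theorem zipWith_map_self {α β : Type} (f : β → α → β) (h : α → β) (l : List α) :
    List.zipWith f (l.map h) l = l.map (fun x => f (h x) x) := by
  induction l with
  | nil => rfl
  | cons a t ih => simp [ih]

-- ===== VERDICT (by name: the statement is the Claim_ definition above) =====
theorem dataset_spec : Claim_equal_dataset := by
  intro list _
  unfold Spec_dataset dataset dataset_alt
  rw [PySem.List.foldl_append_singleton_eq_map]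
  simp only [List.foldl, dsSweep, zipWith_map_self]
  exact List.map_congr_left fun item _ => by split_ifs <;> simp_all
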